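-- pv_equiv track=rewrite | github.com/manhitv/codesignal | Challenges.py | largestDistance
-- ===== SOURCE A (Python) =====
-- def largestDistance(a):
--     b = a[::2]
--     c, d = [], []
--     for i in range(len(a)):
--         if i%2:
--             c.append(a[i])
--     for i in range(1, len(b)):
--         for j in range(i):
--             d.append(abs(b[i] - b[j]))
--     for i in range(1, len(c)):
--         for j in range(i):
--             d.append(abs(c[i] - c[j]))
--     return max(d)
-- ===== SOURCE B (Python) =====
-- def largestDistance(a):
--     best = None
--     for g in (a[::2], a[1:][::2]):
--         if len(g) >= 2:
--             span = max(g) - min(g)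
--             if best is None or span > best:
--                 best = span
--     return best
-- ===== Notes on version B (the rewrite author's own statement) =====
-- stated objective: faster
-- what changed: Instead of materialising every pairwise absolute difference within each parity group (quadratic nested loops) and taking max of that list, B computes max-min of each parity group in one pass and returns the larger span.
import Mathlib
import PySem

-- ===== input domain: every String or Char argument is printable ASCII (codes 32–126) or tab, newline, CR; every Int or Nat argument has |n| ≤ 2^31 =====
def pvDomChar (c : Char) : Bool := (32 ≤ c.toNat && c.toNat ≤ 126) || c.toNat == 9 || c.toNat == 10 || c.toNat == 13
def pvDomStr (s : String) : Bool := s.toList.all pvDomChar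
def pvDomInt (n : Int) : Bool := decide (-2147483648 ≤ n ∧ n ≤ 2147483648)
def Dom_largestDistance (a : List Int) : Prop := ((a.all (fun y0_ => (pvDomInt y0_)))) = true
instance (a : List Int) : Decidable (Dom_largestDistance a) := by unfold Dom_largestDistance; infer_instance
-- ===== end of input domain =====

-- B computes max-min per parity group in one pass instead of A's quadratic list of all pairwise |differences|.
-- Pre_ excludes lists of length < 3, on which A's max([]) raises ValueError.


-- ===== PORT A =====
def largestDistance (a : List Int) : Int :=
  let b := (PySem.List.slice? a none none 2).getD []          -- b = a[::2]  (step ≠ 0, so never none)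
  let c := (PySem.List.pyRange 0 (a.length : Int) 1).foldl    -- for i in range(len(a)): if i%2: c.append(a[i])
    (fun c i => if PySem.Int.mod i 2 ≠ 0 then c ++ [PySem.List.pyGetD a i 0] else c) []
  let d := (PySem.List.pyRange 1 (b.length : Int) 1).foldl    -- for i in range(1, len(b)): for j in range(i): d.append(abs(b[i]-b[j]))
    (fun d i => (PySem.List.pyRange 0 i 1).foldl
      (fun d j => d ++ [|PySem.List.pyGetD b i 0 - PySem.List.pyGetD b j 0|]) d) []
  let d := (PySem.List.pyRange 1 (c.length : Int) 1).foldl    -- for i in range(1, len(c)): for j in range(i): d.append(abs(c[i]-c[j]))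
    (fun d i => (PySem.List.pyRange 0 i 1).foldl
      (fun d j => d ++ [|PySem.List.pyGetD c i 0 - PySem.List.pyGetD c j 0|]) d) d
  (PySem.List.max? d (fun y => y)).getD 0                     -- return max(d)  (none only outside Pre_)

-- ===== PORT B =====
-- one step of B's loop body 'if len(g) >= 2: span = max(g)-min(g); if best is None or span > best: best = span'
def pvStep (best : Option Int) (g : List Int) : Option Int :=
  if 2 ≤ g.length then
    let span := (PySem.List.max? g (fun y => y)).getD 0 - (PySem.List.min? g (fun y => y)).getD 0
    match best with
    | none => some span
    | some bst => if bst < span then some span else some bst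
  else best

def largestDistance_alt (a : List Int) : Int :=
  let g1 := (PySem.List.slice? a none none 2).getD []                                  -- a[::2]
  let g2 := (PySem.List.slice? (PySem.List.slice a (some 1) none) none none 2).getD [] -- a[1:][::2]
  (([g1, g2].foldl pvStep none).getD 0)    -- 'return best'; best is None only outside Pre_

-- ===== PRECONDITION & SPEC =====
-- Pre_ excludes lists of length < 3: there A's d stays empty and max(d) raises ValueError.
def Pre_largestDistance (a : List Int) : Prop := 3 ≤ a.length
instance (a : List Int) : Decidable (Pre_largestDistance a) := by unfold Pre_largestDistance; infer_instance
def pvWitness_largestDistance : List Int := [1, 5, 3]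

def Spec_largestDistance (a : List Int) (out : Int) : Prop := out = largestDistance_alt a
instance (a : List Int) (out : Int) : Decidable (Spec_largestDistance a out) := by unfold Spec_largestDistance; infer_instance

-- ===== CLAIM (what is proved, stated in full; the proofs are below) =====
def Claim_equal_largestDistance : Prop := ∀ (a : List Int), Dom_largestDistance a → Pre_largestDistance a → Spec_largestDistance a (largestDistance a)

-- ===== LEMMAS AND PROOFS =====

-- every other element of a list, starting with the first (what a[::2] yields)
def everyOther : List Int → List Int
  | [] => []
  | [x] => [x]
  | x :: _ :: t => x :: everyOther t

theorem everyOther_cons (x : Int) (t : List Int) : everyOther (x :: t) = x :: everyOther t.tail := by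
  cases t <;> rfl

theorem length_everyOther (xs : List Int) : (everyOther xs).length = (xs.length + 1) / 2 := by
  induction xs using everyOther.induct <;> (simp_all [everyOther]; try omega)

theorem filterMap_two_step (xs : List Int) :
    List.filterMap (fun k => xs[2 * k]?) (List.range ((xs.length + 1) / 2)) = everyOther xs := by
  induction xs using everyOther.induct with
  | case1 => simp [everyOther]
  | case2 x => simp [everyOther]
  | case3 x y t ih =>
      have hc : (((x :: y :: t).length + 1) / 2) = ((t.length + 1) / 2) + 1 := by
        simp; omega
      rw [hc, List.range_succ_eq_map, List.filterMap_cons, List.filterMap_map]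
      simp only [everyOther]
      have hfun : (fun k => (x :: y :: t)[2 * (k + 1)]?) = (fun k => t[2 * k]?) := by
        funext k
        have h2 : 2 * (k + 1) = 2 * k + 1 + 1 := by omega
        rw [h2]
        simp
      simp only [Function.comp_def]
      rw [hfun, ih]
      rfl

theorem sliceStep2 (xs : List Int) :
    PySem.List.slice? xs none none 2 = some (everyOther xs) := by
  rw [← filterMap_two_step]
  simp only [PySem.List.slice?, PySem.List.sliceIndices]
  norm_num
  have hc : (if 0 < xs.length then (((xs.length : Int) + 2 - 1) / 2).toNat else 0) = (xs.length + 1) / 2 := by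
    split_ifs <;> omega
  rw [hc]
  apply List.filterMap_congr
  intro k _
  congr 1

theorem enum_odd_fold (xs : List Int) (s : Int) (init : List Int) (hs : 0 ≤ s) :
    (PySem.List.enumerate xs s).foldl (fun c p => if PySem.Int.mod p.1 2 ≠ 0 then c ++ [p.2] else c) init
    = init ++ (if s % 2 = 0 then everyOther xs.tail else everyOther xs) := by
  induction xs generalizing s init with
  | nil => simp [PySem.List.enumerate_nil, everyOther]
  | cons x t ih =>
    rw [PySem.List.enumerate_cons, List.foldl_cons]
    by_cases h : s % 2 = 0
    · have hm : ¬ (PySem.Int.mod s 2 ≠ 0) := by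
        rw [PySem.Int.mod_eq_emod_of_pos (by norm_num)]; omega
      rw [if_neg hm, ih (s + 1) init (by omega), if_neg (by omega), if_pos h]
      rfl
    · have hm : PySem.Int.mod s 2 ≠ 0 := by
        rw [PySem.Int.mod_eq_emod_of_pos (by norm_num)]; omega
      rw [if_pos hm, ih (s + 1) (init ++ [x]) (by omega), if_pos (by omega), if_neg h,
        everyOther_cons, List.append_assoc]
      rfl

-- A's index loop over i%2 collects exactly the odd-position elements
theorem odd_fold (xs : List Int) :
    (PySem.List.pyRange 0 (xs.length : Int) 1).foldl
      (fun c i => if PySem.Int.mod i 2 ≠ 0 then c ++ [PySem.List.pyGetD xs i 0] else c) []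
    = everyOther xs.tail := by
  have h2 : (PySem.List.enumerate xs).foldl (fun c p => if PySem.Int.mod p.1 2 ≠ 0 then c ++ [p.2] else c) [] =
      (PySem.List.pyRange 0 (xs.length : Int) 1).foldl
      (fun c i => if PySem.Int.mod i 2 ≠ 0 then c ++ [PySem.List.pyGetD xs i 0] else c) [] := by
    rw [PySem.List.enumerate_eq_map_pyRange xs 0, List.foldl_map]
    rfl
  rw [← h2, enum_odd_fold xs 0 [] (by omega)]
  simp

-- the quadratic inner list of A, in flatMap form
def dl (g : List Int) : List Int :=
  (PySem.List.pyRange 1 (g.length : Int) 1).flatMap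
    (fun i => (PySem.List.pyRange 0 i 1).map
      (fun j => |PySem.List.pyGetD g i 0 - PySem.List.pyGetD g j 0|))

theorem fold_dl (g : List Int) (init : List Int) :
    (PySem.List.pyRange 1 (g.length : Int) 1).foldl
      (fun d i => (PySem.List.pyRange 0 i 1).foldl
        (fun d j => d ++ [|PySem.List.pyGetD g i 0 - PySem.List.pyGetD g j 0|]) d) init
    = init ++ dl g := by
  simp only [PySem.List.foldl_append_singleton_eq_map]
  rw [PySem.List.foldl_append_eq_flatMap]
  rfl

theorem mem_dl {r : Int} {g : List Int} :
    r ∈ dl g ↔ ∃ i j : Int, 1 ≤ i ∧ i < (g.length : Int) ∧ 0 ≤ j ∧ j < i ∧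
      r = |PySem.List.pyGetD g i 0 - PySem.List.pyGetD g j 0| := by
  simp [dl, List.mem_flatMap, List.mem_map, PySem.List.mem_pyRange_one]
  aesop

theorem dl_le {r M m : Int} {g : List Int} (hr : r ∈ dl g)
    (hM : PySem.List.max? g (fun y => y) = some M)
    (hm : PySem.List.min? g (fun y => y) = some m) : r ≤ M - m := by
  rw [mem_dl] at hr
  obtain ⟨i, j, h1, h2, h3, h4, h5⟩ := hr
  rw [PySem.List.pyGetD_eq_getElem g 0 (by omega) h2,
      PySem.List.pyGetD_eq_getElem g 0 h3 (by omega)] at h5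
  have hiM := PySem.List.max?_isMax hM _ (List.getElem_mem (l := g) (n := i.toNat) (by omega))
  have him := PySem.List.min?_isMin hm _ (List.getElem_mem (l := g) (n := i.toNat) (by omega))
  have hjM := PySem.List.max?_isMax hM _ (List.getElem_mem (l := g) (n := j.toNat) (by omega))
  have hjm := PySem.List.min?_isMin hm _ (List.getElem_mem (l := g) (n := j.toNat) (by omega))
  simp only at hiM him hjM hjm
  rw [h5, abs_sub_le_iff]
  omega

theorem span_mem {M m : Int} {g : List Int} (hg : 2 ≤ g.length)
    (hM : PySem.List.max? g (fun y => y) = some M)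
    (hm : PySem.List.min? g (fun y => y) = some m) : M - m ∈ dl g := by
  have hMg := PySem.List.max?_mem hM
  have hmg := PySem.List.min?_mem hm
  have hmM : m ≤ M := PySem.List.min?_isMin hm _ hMg
  obtain ⟨p, hp, hgp⟩ := List.mem_iff_getElem.mp hMg
  obtain ⟨q, hq, hgq⟩ := List.mem_iff_getElem.mp hmg
  rcases Nat.lt_trichotomy p q with h | h | h
  · rw [mem_dl]
    refine ⟨(q : Int), (p : Int), by omega, by omega, by omega, by omega, ?_⟩
    rw [PySem.List.pyGetD_eq_getElem g 0 (by omega) (by omega),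
        PySem.List.pyGetD_eq_getElem g 0 (by omega) (by omega)]
    simp only [Int.toNat_natCast]
    rw [hgp, hgq, abs_sub_comm, abs_of_nonneg (by omega)]
  · subst h
    have hMm : M = m := by rw [← hgp, ← hgq]
    have h1 : g[1]'(by omega) = m := by
      have h1M := PySem.List.max?_isMax hM _ (List.getElem_mem (l := g) (n := 1) (by omega))
      have h1m := PySem.List.min?_isMin hm _ (List.getElem_mem (l := g) (n := 1) (by omega))
      simp only at h1M h1m; omega
    have h0 : g[0]'(by omega) = m := by
      have h0M := PySem.List.max?_isMax hM _ (List.getElem_mem (l := g) (n := 0) (by omega))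
      have h0m := PySem.List.min?_isMin hm _ (List.getElem_mem (l := g) (n := 0) (by omega))
      simp only at h0M h0m; omega
    rw [mem_dl]
    refine ⟨1, 0, by omega, by omega, by omega, by omega, ?_⟩
    rw [PySem.List.pyGetD_eq_getElem g 0 (by omega) (by omega),
        PySem.List.pyGetD_eq_getElem g 0 (by omega) (by omega)]
    simp only [Int.toNat_one, Int.toNat_zero]
    simp [h1, h0]
    omega
  · rw [mem_dl]
    refine ⟨(p : Int), (q : Int), by omega, by omega, by omega, by omega, ?_⟩
    rw [PySem.List.pyGetD_eq_getElem g 0 (by omega) (by omega),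
        PySem.List.pyGetD_eq_getElem g 0 (by omega) (by omega)]
    simp only [Int.toNat_natCast]
    rw [hgp, hgq, abs_of_nonneg (by omega)]

theorem max_dl {M m : Int} {g : List Int} (hg : 2 ≤ g.length)
    (hM : PySem.List.max? g (fun y => y) = some M)
    (hm : PySem.List.min? g (fun y => y) = some m) :
    PySem.List.max? (dl g) (fun y => y) = some (M - m) := by
  have hsp := span_mem hg hM hm
  cases hr : PySem.List.max? (dl g) (fun y => y) with
  | none => rw [PySem.List.max?_eq_none_iff] at hr; rw [hr] at hsp; simp at hsp
  | some r =>
    have h1 : r ≤ M - m := dl_le (PySem.List.max?_mem hr) hM hm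
    have h2 : M - m ≤ r := PySem.List.max?_isMax hr _ hsp
    congr 1
    omega

theorem max?_some_of_two_le {g : List Int} (hg : 2 ≤ g.length) :
    ∃ M, PySem.List.max? g (fun y => y) = some M := by
  cases h : PySem.List.max? g (fun y => y) with
  | none => rw [PySem.List.max?_eq_none_iff] at h; rw [h] at hg; simp at hg
  | some M => exact ⟨M, rfl⟩

theorem min?_some_of_two_le {g : List Int} (hg : 2 ≤ g.length) :
    ∃ m, PySem.List.min? g (fun y => y) = some m := by
  cases h : PySem.List.min? g (fun y => y) with
  | none => rw [PySem.List.min?_eq_none_iff] at h; rw [h] at hg; simp at hg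
  | some m => exact ⟨m, rfl⟩

-- max of the concatenation of the two pair-difference lists, both groups of size ≥ 2
theorem max_dl_append {M m M2 m2 : Int} {g h : List Int} (hg : 2 ≤ g.length) (hh : 2 ≤ h.length)
    (hM : PySem.List.max? g (fun y => y) = some M)
    (hm : PySem.List.min? g (fun y => y) = some m)
    (hM2 : PySem.List.max? h (fun y => y) = some M2)
    (hm2 : PySem.List.min? h (fun y => y) = some m2) :
    PySem.List.max? (dl g ++ dl h) (fun y => y)
      = some (if M - m < M2 - m2 then M2 - m2 else M - m) := by
  have hs1 := span_mem hg hM hm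
  have hs2 := span_mem hh hM2 hm2
  have hst : (if M - m < M2 - m2 then M2 - m2 else M - m) ∈ dl g ++ dl h := by
    split_ifs
    · exact List.mem_append_right _ hs2
    · exact List.mem_append_left _ hs1
  cases hr : PySem.List.max? (dl g ++ dl h) (fun y => y) with
  | none =>
      rw [PySem.List.max?_eq_none_iff] at hr
      rw [hr] at hst; simp at hst
  | some r =>
      have hrm := PySem.List.max?_mem hr
      have hub : r ≤ (if M - m < M2 - m2 then M2 - m2 else M - m) := by
        rcases List.mem_append.mp hrm with hrg | hrh
        · have := dl_le hrg hM hm; split_ifs <;> omega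
        · have := dl_le hrh hM2 hm2; split_ifs <;> omega
      have hlb := PySem.List.max?_isMax hr _ hst
      simp only at hlb
      congr 1
      omega

-- ===== VERDICT (by name: the statement is the Claim_ definition above) =====
theorem largestDistance_spec : Claim_equal_largestDistance := by
  intro a _hdom hpre
  unfold Pre_largestDistance at hpre
  unfold Spec_largestDistance largestDistance largestDistance_alt
  rw [sliceStep2 a, PySem.List.slice_from_one, sliceStep2 a.tail]
  simp only [Option.getD_some]
  rw [odd_fold a, fold_dl, fold_dl, List.nil_append]
  have hlE : (everyOther a).length = (a.length + 1) / 2 := length_everyOther a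
  have hlO : (everyOther a.tail).length = a.length / 2 := by
    rw [length_everyOther]; simp [List.length_tail]; omega
  have hE2 : 2 ≤ (everyOther a).length := by omega
  obtain ⟨M, hM⟩ := max?_some_of_two_le hE2
  obtain ⟨m, hm⟩ := min?_some_of_two_le hE2
  by_cases hO2 : 2 ≤ (everyOther a.tail).length
  · obtain ⟨M2, hM2⟩ := max?_some_of_two_le hO2
    obtain ⟨m2, hm2⟩ := min?_some_of_two_le hO2
    rw [max_dl_append hE2 hO2 hM hm hM2 hm2]
    simp only [List.foldl_cons, List.foldl_nil, pvStep, if_pos hE2, if_pos hO2, hM, hm, hM2, hm2,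
      Option.getD_some]
    split_ifs <;> simp
  · have hdlO : dl (everyOther a.tail) = [] := by
      unfold dl
      rw [PySem.List.pyRange_one_eq_nil (by omega)]
      rfl
    rw [hdlO, List.append_nil, max_dl hE2 hM hm]
    simp only [List.foldl_cons, List.foldl_nil, pvStep, if_pos hE2, if_neg hO2, hM, hm,
      Option.getD_some]
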